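-- pv_equiv track=rewrite | github.com/asrimanth/Optical-Character-Recognition-using-Probabilistic-Models | trial.py | calculate
-- ===== SOURCE A (Python) =====
-- def calculate(train,test):
--     star_count=0
--     space_count=0
--     mismatch_count=0
--     for i in range(len(train)):
--         for j in range(len(train[i])):
--             if train[i][j]==test[i][j]:
--                 if train[i][j]=='*':
--                     star_count+=1
--                 elif train[i][j]==' ':
--                     space_count+=1
--             else:
--                 mismatch_count+=1
--     return [star_count,space_count,mismatch_count]
-- ===== SOURCE B (Python) =====
-- def calculate(train, test):
--     star_count = sum(1 for i in range(len(train))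
--                        for j in range(len(train[i]))
--                        if train[i][j] == test[i][j] == '*')
--     space_count = sum(1 for i in range(len(train))
--                         for j in range(len(train[i]))
--                         if train[i][j] == test[i][j] == ' ')
--     mismatch_count = sum(1 for i in range(len(train))
--                            for j in range(len(train[i]))
--                            if train[i][j] != test[i][j])
--     return [star_count, space_count, mismatch_count]
-- ===== Notes on version B (the rewrite author's own statement) =====
-- stated objective: alternative
-- what changed: Replaces the single fused nested loop with a three-state accumulator by three independent index-based counting passes, one per returned counter.
import Mathlib
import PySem

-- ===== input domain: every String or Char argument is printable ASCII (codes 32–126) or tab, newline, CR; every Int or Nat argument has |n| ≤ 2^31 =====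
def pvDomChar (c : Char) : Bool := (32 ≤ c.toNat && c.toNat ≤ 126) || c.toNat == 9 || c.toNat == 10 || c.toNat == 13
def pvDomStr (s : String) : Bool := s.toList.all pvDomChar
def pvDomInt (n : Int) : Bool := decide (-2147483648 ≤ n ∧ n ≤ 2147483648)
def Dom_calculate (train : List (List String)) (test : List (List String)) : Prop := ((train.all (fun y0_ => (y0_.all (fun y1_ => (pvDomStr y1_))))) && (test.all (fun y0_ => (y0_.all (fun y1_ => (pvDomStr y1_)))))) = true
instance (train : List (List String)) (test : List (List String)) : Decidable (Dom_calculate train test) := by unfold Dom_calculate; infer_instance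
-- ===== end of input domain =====

-- B replaces A's single fused nested loop (one 3-field accumulator, if/elif/else) by three
-- independent index-based counting passes, one per returned counter (objective: alternative).

-- ===== PORT A =====
-- A's fused nested loop: one pass over all (i, j), a 3-tuple accumulator updated by if/elif/else.
-- Cells are read with getD defaults; Pre_calculate excludes exactly the inputs where Python's
-- indexing into test would raise IndexError, so on Pre_ every getD hits a real element.
def calculate (train : List (List String)) (test : List (List String)) : List Int :=
  let s : Int × Int × Int :=
    (List.range train.length).foldl (fun acc i =>
      let row := train.getD i []
      (List.range row.length).foldl (fun (acc : Int × Int × Int) j =>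
        let t := row.getD j ""
        let u := (test.getD i []).getD j ""
        if t == u then
          if t == "*" then (acc.1 + 1, acc.2.1, acc.2.2)
          else if t == " " then (acc.1, acc.2.1 + 1, acc.2.2)
          else acc
        else (acc.1, acc.2.1, acc.2.2 + 1)) acc) (0, 0, 0)
  [s.1, s.2.1, s.2.2]

-- ===== PORT B =====
-- B's three separate passes: each counter is its own sum over all indices (i, j).
def calculate_alt (train : List (List String)) (test : List (List String)) : List Int :=
  let star : Int :=
    ((List.range train.length).map (fun i =>
      ((List.range (train.getD i []).length).map (fun j =>
        if (train.getD i []).getD j "" == (test.getD i []).getD j ""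
           && (train.getD i []).getD j "" == "*" then (1 : Int) else 0)).sum)).sum
  let space : Int :=
    ((List.range train.length).map (fun i =>
      ((List.range (train.getD i []).length).map (fun j =>
        if (train.getD i []).getD j "" == (test.getD i []).getD j ""
           && (train.getD i []).getD j "" == " " then (1 : Int) else 0)).sum)).sum
  let mismatch : Int :=
    ((List.range train.length).map (fun i =>
      ((List.range (train.getD i []).length).map (fun j =>
        if !((train.getD i []).getD j "" == (test.getD i []).getD j "")
        then (1 : Int) else 0)).sum)).sum
  [star, space, mismatch]

-- ===== PRECONDITION & SPEC =====
-- Pre_ excludes exactly the inputs on which Python A raises IndexError: some nonempty train row i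
-- has no test row i, or test row i is shorter than train row i.
def Pre_calculate (train : List (List String)) (test : List (List String)) : Prop :=
  ∀ i < train.length, (train.getD i []).length = 0 ∨
    (i < test.length ∧ (train.getD i []).length ≤ (test.getD i []).length)
instance (train : List (List String)) (test : List (List String)) : Decidable (Pre_calculate train test) := by unfold Pre_calculate; infer_instance
def pvWitness_calculate : List (List String) × List (List String) :=
  ([[" ", "*"], ["x"]], [[" ", "x"], ["x", "y"]])
def Spec_calculate (train : List (List String)) (test : List (List String)) (out : List Int) : Prop := out = calculate_alt train test
instance (train : List (List String)) (test : List (List String)) (out : List Int) : Decidable (Spec_calculate train test out) := by unfold Spec_calculate; infer_instance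

-- ===== CLAIM (what is proved, stated in full; the proofs are below) =====
def Claim_equal_calculate : Prop := ∀ (train : List (List String)) (test : List (List String)), Dom_calculate train test → Pre_calculate train test → Spec_calculate train test (calculate train test)

-- ===== LEMMAS AND PROOFS =====

-- A fold whose body adds (F j, G j, H j) componentwise equals the three separate sums.
theorem foldl_triple {F G H : Nat → Int} {b : (Int × Int × Int) → Nat → Int × Int × Int}
    (hb : ∀ acc j, b acc j = (acc.1 + F j, acc.2.1 + G j, acc.2.2 + H j)) :
    ∀ (l : List Nat) (acc : Int × Int × Int),
      l.foldl b acc = (acc.1 + (l.map F).sum, acc.2.1 + (l.map G).sum, acc.2.2 + (l.map H).sum) := by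
  intro l
  induction l with
  | nil => intro acc; simp
  | cons j l ih =>
    intro acc
    simp only [List.foldl_cons, List.map_cons, List.sum_cons, hb, ih]
    refine congrArg₂ Prod.mk (by ring) (congrArg₂ Prod.mk (by ring) (by ring))

theorem calculate_spec : Claim_equal_calculate := by
  intro train test _ _
  unfold Spec_calculate calculate calculate_alt
  have hinner : ∀ (i : Nat) (acc : Int × Int × Int),
      (List.range (train.getD i []).length).foldl (fun (acc : Int × Int × Int) j =>
        let t := (train.getD i []).getD j ""
        let u := (test.getD i []).getD j ""
        if t == u then
          if t == "*" then (acc.1 + 1, acc.2.1, acc.2.2)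
          else if t == " " then (acc.1, acc.2.1 + 1, acc.2.2)
          else acc
        else (acc.1, acc.2.1, acc.2.2 + 1)) acc
      = (acc.1 + ((List.range (train.getD i []).length).map (fun j =>
            if (train.getD i []).getD j "" == (test.getD i []).getD j ""
               && (train.getD i []).getD j "" == "*" then (1 : Int) else 0)).sum,
         acc.2.1 + ((List.range (train.getD i []).length).map (fun j =>
            if (train.getD i []).getD j "" == (test.getD i []).getD j ""
               && (train.getD i []).getD j "" == " " then (1 : Int) else 0)).sum,
         acc.2.2 + ((List.range (train.getD i []).length).map (fun j =>
            if !((train.getD i []).getD j "" == (test.getD i []).getD j "")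
            then (1 : Int) else 0)).sum) := by
    intro i acc
    refine foldl_triple (fun acc j => ?_) _ acc
    set t := (train.getD i []).getD j "" with ht
    set u := (test.getD i []).getD j "" with hu
    simp only []
    by_cases h1 : t == u
    · by_cases h2 : t == "*"
      · have h3 : (t == " ") = false := by
          simp only [beq_iff_eq] at h2 ⊢; simp [h2]
        simp [h1, h2, h3]
      · by_cases h3 : t == " " <;> simp [h1, h2, h3]
    · simp [h1]
  have houter := foldl_triple (F := fun i =>
      ((List.range (train.getD i []).length).map (fun j =>
        if (train.getD i []).getD j "" == (test.getD i []).getD j ""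
           && (train.getD i []).getD j "" == "*" then (1 : Int) else 0)).sum)
    (G := fun i =>
      ((List.range (train.getD i []).length).map (fun j =>
        if (train.getD i []).getD j "" == (test.getD i []).getD j ""
           && (train.getD i []).getD j "" == " " then (1 : Int) else 0)).sum)
    (H := fun i =>
      ((List.range (train.getD i []).length).map (fun j =>
        if !((train.getD i []).getD j "" == (test.getD i []).getD j "")
        then (1 : Int) else 0)).sum)
    (b := fun acc i =>
      (List.range (train.getD i []).length).foldl (fun (acc : Int × Int × Int) j =>
        let t := (train.getD i []).getD j ""
        let u := (test.getD i []).getD j ""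
        if t == u then
          if t == "*" then (acc.1 + 1, acc.2.1, acc.2.2)
          else if t == " " then (acc.1, acc.2.1 + 1, acc.2.2)
          else acc
        else (acc.1, acc.2.1, acc.2.2 + 1)) acc)
    (fun acc i => hinner i acc) (List.range train.length) (0, 0, 0)
  simp only [houter]
  simp
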